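-- pv_equiv track=rewrite | github.com/alexander-jiang/wordle-adversarial | wordle/word_set_partitioner.py | pick_narrowing_guesses_by_letters
-- ===== SOURCE A (Python) =====
-- from typing import List, Dict, MutableSet, Tuple, Optional
--
-- def pick_narrowing_guesses_by_letters(letters: List[str], guess_wordlist: List[str]):
--     best_guesses = []
--     max_letters_covered = 0
--     for candidate in guess_wordlist:
--         letters_in_candidate = [letter for letter in letters if letter in candidate]
--         if len(letters_in_candidate) > max_letters_covered:
--             max_letters_covered = len(letters_in_candidate)
--             best_guesses = [candidate]
--         elif len(letters_in_candidate) == max_letters_covered: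
--             best_guesses.append(candidate)
--     return best_guesses, max_letters_covered
-- ===== SOURCE B (Python) =====
-- def pick_narrowing_guesses_by_letters(letters, guess_wordlist):
--     scored = [(w, sum(1 for letter in letters if letter in w)) for w in guess_wordlist]
--     max_letters_covered = max((c for _, c in scored), default=0)
--     best_guesses = [w for w, c in scored if c == max_letters_covered]
--     return best_guesses, max_letters_covered
-- ===== Notes on version B (the rewrite author's own statement) =====
-- stated objective: simpler
-- what changed: Replaces A's running-max loop with mutable best-list resets by a score-once / max-with-default / filter pipeline over a scored list.
import Mathlib
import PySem

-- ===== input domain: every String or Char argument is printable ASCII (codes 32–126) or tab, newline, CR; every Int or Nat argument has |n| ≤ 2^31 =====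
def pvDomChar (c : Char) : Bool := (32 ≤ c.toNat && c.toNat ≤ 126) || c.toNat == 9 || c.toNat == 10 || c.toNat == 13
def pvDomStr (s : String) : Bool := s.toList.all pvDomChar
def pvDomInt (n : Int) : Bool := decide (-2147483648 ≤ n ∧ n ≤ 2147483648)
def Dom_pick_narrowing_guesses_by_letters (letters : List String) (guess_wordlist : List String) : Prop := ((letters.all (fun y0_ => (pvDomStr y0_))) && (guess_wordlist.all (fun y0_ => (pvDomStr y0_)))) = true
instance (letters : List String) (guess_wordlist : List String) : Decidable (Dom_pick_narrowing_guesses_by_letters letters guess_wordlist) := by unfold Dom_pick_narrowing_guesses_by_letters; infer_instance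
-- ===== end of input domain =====

-- B replaces A's single-pass running-max loop (which resets/extends a best list as it goes)
-- by a score-once / max-with-default-0 / filter pipeline; objective: simpler decomposition.

-- ===== PORT A =====
-- A's loop body: count letters found in the candidate, compare with the running max, reset/append/skip.
def pvStepA (letters : List String) (st : List String × Int) (candidate : String) : List String × Int :=
  let letters_in_candidate := letters.filter (fun letter => PySem.Str.isIn letter candidate)
  if (letters_in_candidate.length : Int) > st.2 then
    ([candidate], (letters_in_candidate.length : Int))
  else if (letters_in_candidate.length : Int) = st.2 then
    (st.1 ++ [candidate], st.2)
  else st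

def pick_narrowing_guesses_by_letters (letters : List String) (guess_wordlist : List String) : List String × Int :=
  guess_wordlist.foldl (pvStepA letters) ([], 0)

-- ===== PORT B =====
-- sum(1 for letter in letters if letter in w)
def pvCoverage (letters : List String) (w : String) : Int :=
  letters.foldl (fun acc letter => if PySem.Str.isIn letter w then acc + 1 else acc) 0

def pick_narrowing_guesses_by_letters_alt (letters : List String) (guess_wordlist : List String) : List String × Int :=
  let scored := guess_wordlist.map (fun w => (w, pvCoverage letters w))
  let max_letters_covered := (scored.map Prod.snd).foldl max 0
  let best_guesses := (scored.filter (fun p => p.2 == max_letters_covered)).map Prod.fst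
  (best_guesses, max_letters_covered)

-- ===== PRECONDITION & SPEC =====
def Spec_pick_narrowing_guesses_by_letters (letters : List String) (guess_wordlist : List String) (out : List String × Int) : Prop := out = pick_narrowing_guesses_by_letters_alt letters guess_wordlist
instance (letters : List String) (guess_wordlist : List String) (out : List String × Int) : Decidable (Spec_pick_narrowing_guesses_by_letters letters guess_wordlist out) := by unfold Spec_pick_narrowing_guesses_by_letters; infer_instance

-- ===== CLAIM (what is proved, stated in full; the proofs are below) =====
def Claim_equal_pick_narrowing_guesses_by_letters : Prop := ∀ (letters : List String) (guess_wordlist : List String), Dom_pick_narrowing_guesses_by_letters letters guess_wordlist → Spec_pick_narrowing_guesses_by_letters letters guess_wordlist (pick_narrowing_guesses_by_letters letters guess_wordlist)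

-- ===== LEMMAS AND PROOFS =====

-- The count A computes per candidate, as an Int.
def pvCnt (letters : List String) (w : String) : Int :=
  ((letters.filter (fun letter => PySem.Str.isIn letter w)).length : Int)

-- A conditional-increment foldl counts the elements satisfying the predicate.
theorem pvFoldlCount {α : Type} (p : α → Bool) :
    ∀ (l : List α) (a : Int),
      l.foldl (fun acc x => if p x then acc + 1 else acc) a = a + ((l.filter p).length : Int) := by
  intro l
  induction l with
  | nil => intro a; simp
  | cons x xs ih =>
      intro a
      rw [List.foldl_cons, List.filter_cons]
      by_cases hx : p x = true
      · rw [if_pos hx, if_pos hx, ih]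
        push_cast [List.length_cons]
        ring
      · rw [if_neg hx, if_neg hx, ih]

-- B's foldl-sum equals A's filter-length count.
theorem pvCoverage_eq_cnt (letters : List String) (w : String) :
    pvCoverage letters w = pvCnt letters w := by
  unfold pvCoverage pvCnt
  rw [pvFoldlCount (fun letter => PySem.Str.isIn letter w) letters 0]
  simp

-- The three branches of A's step, in terms of pvCnt.
theorem pvStepA_gt (letters : List String) (st : List String × Int) (w : String)
    (h : pvCnt letters w > st.2) : pvStepA letters st w = ([w], pvCnt letters w) := by
  simp only [pvStepA, pvCnt] at *
  rw [if_pos h]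

theorem pvStepA_eq (letters : List String) (st : List String × Int) (w : String)
    (h : pvCnt letters w = st.2) : pvStepA letters st w = (st.1 ++ [w], st.2) := by
  simp only [pvStepA, pvCnt] at *
  rw [if_neg (by omega), if_pos h]

theorem pvStepA_lt (letters : List String) (st : List String × Int) (w : String)
    (h : pvCnt letters w < st.2) : pvStepA letters st w = st := by
  simp only [pvStepA, pvCnt] at *
  rw [if_neg (by omega), if_neg (by omega)]

-- Characterisation of A's loop: result = (best kept iff the max never moves, ++ the maximal suffix elements, running max).
theorem pvLoopA (letters : List String) :
    ∀ (rest best : List String) (m : Int),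
      rest.foldl (pvStepA letters) (best, m)
      = ((if m = (rest.map (pvCnt letters)).foldl max m then best else [])
           ++ rest.filter (fun w => pvCnt letters w == (rest.map (pvCnt letters)).foldl max m),
         (rest.map (pvCnt letters)).foldl max m) := by
  intro rest
  induction rest with
  | nil => intro best m; simp
  | cons w ws ih =>
      intro best m
      have hle : ∀ (a : Int) (l : List Int), a ≤ l.foldl max a := fun a l => (PySem.List.le_foldl_max l a).1
      rw [List.foldl_cons, List.map_cons, List.foldl_cons, List.filter_cons]
      by_cases h1 : pvCnt letters w > m
      · have hmax : max m (pvCnt letters w) = pvCnt letters w := by omega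
        rw [pvStepA_gt letters (best, m) w h1, ih [w] (pvCnt letters w), hmax]
        have hM : pvCnt letters w ≤ (ws.map (pvCnt letters)).foldl max (pvCnt letters w) := hle _ _
        rw [if_neg (by omega : ¬ (m = (ws.map (pvCnt letters)).foldl max (pvCnt letters w)))]
        by_cases h2 : pvCnt letters w = (ws.map (pvCnt letters)).foldl max (pvCnt letters w)
        · simp only [beq_iff_eq, if_pos h2, List.nil_append, List.singleton_append]
        · simp only [beq_iff_eq, if_neg h2, List.nil_append]
      · by_cases h2 : pvCnt letters w = m
        · have hmax : max m (pvCnt letters w) = m := by omega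
          rw [pvStepA_eq letters (best, m) w h2, ih (best ++ [w]) m, hmax]
          by_cases h3 : m = (ws.map (pvCnt letters)).foldl max m
          · have hc' : pvCnt letters w = (ws.map (pvCnt letters)).foldl max m := h2.trans h3
            simp only [beq_iff_eq, if_pos h3, if_pos hc', List.cons_append, List.nil_append,
              List.append_assoc]
          · have hne : ¬ (pvCnt letters w = (ws.map (pvCnt letters)).foldl max m) := by
              rw [h2]; exact h3
            simp only [beq_iff_eq, if_neg h3, if_neg hne, List.nil_append]
        · have h4 : pvCnt letters w < m := by omega
          have hmax : max m (pvCnt letters w) = m := by omega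
          rw [pvStepA_lt letters (best, m) w h4, ih best m, hmax]
          have hM : m ≤ (ws.map (pvCnt letters)).foldl max m := hle _ _
          have : ¬ (pvCnt letters w = (ws.map (pvCnt letters)).foldl max m) := by omega
          simp [this]

-- B's scored-list pipeline collapses to a filter over the wordlist.
theorem pvAltEq (letters : List String) (guess_wordlist : List String) :
    pick_narrowing_guesses_by_letters_alt letters guess_wordlist
      = (guess_wordlist.filter
           (fun w => pvCnt letters w == (guess_wordlist.map (pvCnt letters)).foldl max 0),
         (guess_wordlist.map (pvCnt letters)).foldl max 0) := by
  unfold pick_narrowing_guesses_by_letters_alt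
  simp only [List.map_map, Function.comp_def, pvCoverage_eq_cnt, List.filter_map]
  simp

-- ===== VERDICT (by name: the statement is the Claim_ definition above) =====
theorem pick_narrowing_guesses_by_letters_spec : Claim_equal_pick_narrowing_guesses_by_letters := by
  intro letters guess_wordlist _
  unfold Spec_pick_narrowing_guesses_by_letters
  unfold pick_narrowing_guesses_by_letters
  rw [pvLoopA letters guess_wordlist [] 0, pvAltEq]
  simp
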